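-- pv_equiv track=rewrite | github.com/Xyfuture/MatrixMachine | matrixmachine/strategy/agent_grid_search.py | _calculate_split_boundaries
-- ===== SOURCE A (Python) =====
-- from typing import Dict, List, Optional, Set, Tuple
--
-- def _calculate_split_boundaries(dimension: int, num_splits: int) -> List[Tuple[int, int]]:
--     """Calculate split boundaries with ceiling operation for edge tiles."""
--     if num_splits <= 0:
--         return [(0, dimension)]
--
--     base_size = dimension // num_splits
--     remainder = dimension % num_splits
--
--     boundaries = []
--     start = 0
--
--     for i in range(num_splits):
--         # Distribute remainder to first `remainder` splits (ceiling operation)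
--         size = base_size + (1 if i < remainder else 0)
--         end = start + size
--         boundaries.append((start, end))
--         start = end
--
--     return boundaries
-- ===== SOURCE B (Python) =====
-- from typing import Dict, List, Optional, Set, Tuple
--
-- def _calculate_split_boundaries(dimension: int, num_splits: int) -> List[Tuple[int, int]]:
--     """Closed-form boundaries: each tuple computed directly from its index, no running start."""
--     if num_splits <= 0:
--         return [(0, dimension)]
--     base_size = dimension // num_splits
--     remainder = dimension % num_splits
--     return [(i * base_size + min(i, remainder), (i + 1) * base_size + min(i + 1, remainder))
--             for i in range(num_splits)]
-- ===== Notes on version B (the rewrite author's own statement) =====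
-- stated objective: alternative
-- what changed: Replaces the stateful loop threading a running start accumulator with a closed-form list comprehension computing each boundary pair directly from its index via i*base_size + min(i, remainder).
import Mathlib
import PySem

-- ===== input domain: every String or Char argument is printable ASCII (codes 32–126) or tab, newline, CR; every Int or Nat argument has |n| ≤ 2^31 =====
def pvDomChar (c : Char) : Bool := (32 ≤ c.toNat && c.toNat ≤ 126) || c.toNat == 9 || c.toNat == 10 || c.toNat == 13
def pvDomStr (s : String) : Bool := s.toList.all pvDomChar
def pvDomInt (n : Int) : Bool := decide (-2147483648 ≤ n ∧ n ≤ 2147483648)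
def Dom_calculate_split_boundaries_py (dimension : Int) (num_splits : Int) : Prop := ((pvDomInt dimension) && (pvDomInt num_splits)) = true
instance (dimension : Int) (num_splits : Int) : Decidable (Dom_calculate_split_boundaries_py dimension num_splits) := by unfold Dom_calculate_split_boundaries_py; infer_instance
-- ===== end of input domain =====

-- B replaces the running-start loop with a closed-form per-index formula; same values on all inputs.
-- ===== PORT A =====
def calculate_split_boundaries_py (dimension : Int) (num_splits : Int) : List (Int × Int) :=
  if num_splits ≤ 0 then [(0, dimension)]
  else
    let base_size := PySem.Int.floordiv dimension num_splits
    let remainder := PySem.Int.mod dimension num_splits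
    let st := (PySem.List.pyRange 0 num_splits 1).foldl
      (fun (st : List (Int × Int) × Int) i =>
        let size := base_size + (if i < remainder then 1 else 0)
        let e := st.2 + size
        (st.1 ++ [(st.2, e)], e))
      ([], 0)
    st.1

-- ===== PORT B =====
def calculate_split_boundaries_py_alt (dimension : Int) (num_splits : Int) : List (Int × Int) :=
  if num_splits ≤ 0 then [(0, dimension)]
  else
    let base_size := PySem.Int.floordiv dimension num_splits
    let remainder := PySem.Int.mod dimension num_splits
    (PySem.List.pyRange 0 num_splits 1).map
      (fun i => (i * base_size + min i remainder, (i + 1) * base_size + min (i + 1) remainder))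

-- ===== PRECONDITION & SPEC =====
def Spec_calculate_split_boundaries_py (dimension : Int) (num_splits : Int) (out : List (Int × Int)) : Prop := out = calculate_split_boundaries_py_alt dimension num_splits
instance (dimension : Int) (num_splits : Int) (out : List (Int × Int)) : Decidable (Spec_calculate_split_boundaries_py dimension num_splits out) := by unfold Spec_calculate_split_boundaries_py; infer_instance

-- ===== CLAIM (what is proved, stated in full; the proofs are below) =====
def Claim_equal_calculate_split_boundaries_py : Prop := ∀ (dimension : Int) (num_splits : Int), Dom_calculate_split_boundaries_py dimension num_splits → Spec_calculate_split_boundaries_py dimension num_splits (calculate_split_boundaries_py dimension num_splits)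

-- ===== LEMMAS AND PROOFS =====

-- Loop invariant: folding A's step over indices j..j+n-1 from start s = j*b + min j r
-- appends exactly B's closed-form pairs for those indices.
theorem pv_loop_closed_form (b r : Int) :
    ∀ (n j : Nat) (acc : List (Int × Int)) (s : Int), s = (j : Int) * b + min (j : Int) r →
    (((List.range' j n).map (fun (k : Nat) => (k : Int))).foldl
      (fun (st : List (Int × Int) × Int) i =>
        let size := b + (if i < r then 1 else 0)
        let e := st.2 + size
        (st.1 ++ [(st.2, e)], e))
      (acc, s)).1
    = acc ++ (List.range' j n).map
        (fun (k : Nat) => ((k : Int) * b + min (k : Int) r,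
                           ((k : Int) + 1) * b + min ((k : Int) + 1) r)) := by
  intro n
  induction n with
  | zero => intro j acc s hs; simp
  | succ m ih =>
    intro j acc s hs
    rw [List.range'_succ]
    simp only [List.map_cons, List.foldl_cons]
    have hstep : s + (b + (if (j : Int) < r then 1 else 0))
        = ((j : Int) + 1) * b + min ((j : Int) + 1) r := by
      have hmin : min ((j : Int) + 1) r = min (j : Int) r + (if (j : Int) < r then 1 else 0) := by
        split <;> omega
      subst hs; rw [hmin]; ring
    have := ih (j + 1) (acc ++ [(s, s + (b + (if (j : Int) < r then 1 else 0)))])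
      (s + (b + (if (j : Int) < r then 1 else 0)))
      (by push_cast; rw [hstep])
    simp only [this]
    subst hs
    simp [List.append_assoc, hstep]

-- ===== VERDICT (by name: the statement is the Claim_ definition above) =====
theorem calculate_split_boundaries_py_spec : Claim_equal_calculate_split_boundaries_py := by
  intro dimension num_splits _
  unfold Spec_calculate_split_boundaries_py calculate_split_boundaries_py calculate_split_boundaries_py_alt
  by_cases h : num_splits ≤ 0
  · simp [h]
  · replace h : 0 < num_splits := by omega
    simp only [if_neg (not_le.mpr h)]
    have hr : 0 ≤ PySem.Int.mod dimension num_splits := PySem.Int.mod_nonneg dimension h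
    have hrange : PySem.List.pyRange 0 num_splits 1
        = (List.range' 0 num_splits.toNat).map (fun (k : Nat) => (k : Int)) := by
      rw [show num_splits = ((num_splits.toNat : Nat) : Int) by omega,
        PySem.List.pyRange_zero_natCast]
      simp [List.range_eq_range',
        show (max num_splits 0).toNat = num_splits.toNat from by omega]
    rw [hrange,
      pv_loop_closed_form (PySem.Int.floordiv dimension num_splits)
        (PySem.Int.mod dimension num_splits) num_splits.toNat 0 [] 0 (by simp [min_eq_left hr])]
    simp
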